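-- pv_equiv track=rewrite | github.com/ten22one/Soft-compression-algorithm-for-gray-image | Decode.py | header_extractor
-- ===== SOURCE A (Python) =====
-- def header_extractor(step, input_str):
--     """
--     Get the header information from the binary value
--     """
--     binary_value = ''  # binary value
--     length_batch = 0
--     while True:
--         batch = input_str[length_batch * step:(length_batch + 1) * step]
--         if batch[0] == '1':
--             length_batch += 1
--             binary_value += batch[1:step]
--             break
--         else:
--             length_batch += 1
--             binary_value += batch[1:step]
--     return length_batch * step, int(binary_value, 2)
-- ===== SOURCE B (Python) =====
-- def header_extractor(step, input_str):
--     """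
--     Get the header information from the binary value
--     """
--     # hunt for the stop flag by jumping from one '1' character to the next with
--     # str.find until one lands on a flag slot (an index divisible by step)
--     i = input_str.find('1')
--     while i != -1 and i % step != 0:
--         i = input_str.find('1', i + 1)
--     if i == -1:
--         raise ValueError('no stop flag in header')
--     end = i + step
--     # drop the flag column from the header prefix; the rest are the data bits
--     bits = ''.join(c for j, c in enumerate(input_str[:end]) if j % step != 0)
--     return end, int(bits, 2)
-- ===== Notes on version B (the rewrite author's own statement) =====
-- stated objective: alternative
-- what changed: A's batch-by-batch do-while (slice a batch, test its flag, append its tail) is replaced by a substring-search loop that jumps between '1' characters with str.find to locate the stop flag, followed by a single enumerate-filter over the header prefix that deletes the flag column; no per-batch slicing remains.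
-- outside the precondition, e.g. on header_extractor(-1, '1100'): A returns (-1, 1), B raises ValueError
import Mathlib
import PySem

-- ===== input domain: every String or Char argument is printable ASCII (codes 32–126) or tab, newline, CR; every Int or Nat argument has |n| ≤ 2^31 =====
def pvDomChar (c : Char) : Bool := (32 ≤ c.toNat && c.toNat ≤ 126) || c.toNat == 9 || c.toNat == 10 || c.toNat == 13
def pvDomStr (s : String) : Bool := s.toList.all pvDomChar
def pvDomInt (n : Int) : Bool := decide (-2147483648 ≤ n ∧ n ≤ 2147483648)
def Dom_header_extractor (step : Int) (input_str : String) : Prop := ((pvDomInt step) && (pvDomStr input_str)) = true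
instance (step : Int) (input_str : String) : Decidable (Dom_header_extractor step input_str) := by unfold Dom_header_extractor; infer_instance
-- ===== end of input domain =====

-- B replaces A's batch-by-batch do-while with a str.find jump between '1' characters to locate
-- the stop flag, then one enumerate-filter deleting the flag column; same cost, different algorithm.


-- ===== PORT A =====
-- the while-True loop of A; `none` = the Python raised (empty batch → IndexError, or int(·,2) → ValueError)
def hdrLoopA (step : Int) (cs : List Char) (length_batch : Int) (binary : List Char) : Nat → Option (Int × Int)
  | 0 => none
  | fuel + 1 =>
    let batch := PySem.List.slice cs (some (length_batch * step)) (some ((length_batch + 1) * step))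
    match PySem.List.pyGet? batch 0 with
    | none => none
    | some c =>
      if c = '1' then
        match PySem.Int.ofCharsBase? (binary ++ PySem.List.slice batch (some 1) (some step)) 2 with
        | none => none
        | some v => some ((length_batch + 1) * step, v)
      else
        hdrLoopA step cs (length_batch + 1) (binary ++ PySem.List.slice batch (some 1) (some step)) fuel

def header_extractor (step : Int) (input_str : String) : Int × Int :=
  (hdrLoopA step input_str.toList 0 [] (input_str.toList.length + 2)).getD (0, 0)

-- ===== PORT B =====
-- the while loop of Source B: jump between '1' occurrences with find until one sits on a flag slot
def hdrJump (step : Int) (cs : List Char) (i : Int) : Nat → Int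
  | 0 => i
  | fuel + 1 =>
    if i = -1 then i
    else if PySem.Int.mod i step = 0 then i
    else hdrJump step cs (PySem.Chars.findFrom cs ['1'] (i + 1) none) fuel

def hdrFinish (step : Int) (cs : List Char) (i : Int) : Int × Int :=
  if i = -1 then (0, 0)  -- Source B raises ValueError here
  else
    match PySem.Int.ofCharsBase?
        (((PySem.List.enumerate (PySem.List.slice cs none (some (i + step))) 0).filter
            (fun p => !(PySem.Int.mod p.1 step == 0))).map (·.2)) 2 with
    | none => (0, 0)  -- int(·, 2) raised ValueError
    | some v => (i + step, v)

def header_extractor_alt (step : Int) (input_str : String) : Int × Int :=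
  hdrFinish step input_str.toList
    (hdrJump step input_str.toList (PySem.Chars.find input_str.toList ['1'])
      (input_str.toList.length + 2))

-- ===== PRECONDITION & SPEC =====
-- data bits of batch j: input_str[j*step+1 : (j+1)*step]
def hdrChunk (st : Nat) (cs : List Char) (j : Nat) : List Char := (cs.drop (j * st + 1)).take (st - 1)
-- the whole binary_value when the stop flag sits in batch k
def hdrBits (st : Nat) (cs : List Char) (k : Nat) : List Char :=
  ((List.range (k + 1)).map (hdrChunk st cs)).flatten

-- Pre_ restricts to the codec's natural domain, batch width step ≥ 2 (for step 0 and 1 A always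
-- raises; for negative step A sometimes returns a value only by accident of Python's negative
-- slice arithmetic, where B's flag search naturally raises), and otherwise states exactly when A
-- returns: some flag position holds '1' before the string runs out, and the collected data
-- characters form a valid base-2 literal.
def Pre_header_extractor (step : Int) (input_str : String) : Prop :=
  2 ≤ step ∧
  ∃ k < input_str.toList.length,
    input_str.toList.getD (k * step.toNat) ' ' = '1' ∧
    (∀ j < k, input_str.toList.getD (j * step.toNat) ' ' ≠ '1') ∧
    (PySem.Int.ofCharsBase? (hdrBits step.toNat input_str.toList k) 2).isSome

instance (step : Int) (input_str : String) : Decidable (Pre_header_extractor step input_str) := by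
  unfold Pre_header_extractor; infer_instance

def pvWitness_header_extractor : Int × String := (2, "0010")

def Spec_header_extractor (step : Int) (input_str : String) (out : Int × Int) : Prop :=
  out = header_extractor_alt step input_str
instance (step : Int) (input_str : String) (out : Int × Int) : Decidable (Spec_header_extractor step input_str out) := by
  unfold Spec_header_extractor; infer_instance

-- ===== CLAIM (what is proved, stated in full; the proofs are below) =====
def Claim_equal_header_extractor : Prop := ∀ (step : Int) (input_str : String), Dom_header_extractor step input_str → Pre_header_extractor step input_str → Spec_header_extractor step input_str (header_extractor step input_str)

-- ===== LEMMAS AND PROOFS =====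

-- ---- A side (the interleaved do-while) ----
theorem hdr_batch_eq (st : Nat) (cs : List Char) (j : Nat) :
    PySem.List.slice cs (some ((j : Int) * (st : Int))) (some (((j : Int) + 1) * (st : Int)))
      = (cs.drop (j * st)).take st := by
  have h1 : (j : Int) * (st : Int) = ((j * st : Nat) : Int) := by push_cast; ring
  have h2 : ((j : Int) + 1) * (st : Int) = ((j * st + st : Nat) : Int) := by push_cast; ring
  rw [h1, h2, PySem.List.slice_natCast]
  simp

theorem hdr_chunk_slice (st : Nat) (cs : List Char) (j : Nat) (hst : 1 ≤ st) :
    PySem.List.slice ((cs.drop (j * st)).take st) (some 1) (some (st : Int))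
      = hdrChunk st cs j := by
  have h1 : (1 : Int) = ((1 : Nat) : Int) := by norm_num
  rw [h1, PySem.List.slice_natCast, hdrChunk]
  rw [List.drop_take, List.drop_drop]
  rw [List.take_take]
  congr 1
  omega

theorem hdr_get_batch (st : Nat) (cs : List Char) (j : Nat) (hst : 1 ≤ st) (h : j * st < cs.length) :
    PySem.List.pyGet? ((cs.drop (j * st)).take st) 0 = some (cs.getD (j * st) ' ') := by
  rw [PySem.List.pyGet?_zero]
  rw [List.getElem?_eq_getElem (by simp; omega)]
  simp [List.getD_eq_getElem?_getD, List.getElem?_eq_getElem h]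

theorem hdr_loopA_eq (st : Nat) (cs : List Char) (k : Nat) (hst : 2 ≤ st)
    (hk : k * st < cs.length)
    (hflag : cs.getD (k * st) ' ' = '1')
    (hprev : ∀ j < k, cs.getD (j * st) ' ' ≠ '1') :
    ∀ (d j : Nat) (B : List Char) (fuel : Nat), j + d = k → d + 1 ≤ fuel →
      hdrLoopA (st : Int) cs (j : Int) B fuel
        = (PySem.Int.ofCharsBase? (B ++ ((List.range' j (d + 1)).map (hdrChunk st cs)).flatten) 2).map
            (fun v => (((k : Int) + 1) * (st : Int), v)) := by
  intro d
  induction d with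
  | zero =>
    intro j B fuel hj hfuel
    obtain ⟨f, rfl⟩ : ∃ f, fuel = f + 1 := ⟨fuel - 1, by omega⟩
    simp only [Nat.add_zero] at hj
    subst hj
    simp only [hdrLoopA, hdr_batch_eq st cs j,
      hdr_get_batch st cs j (by omega) (by omega : j * st < cs.length)]
    rw [hflag]
    simp only [hdr_chunk_slice st cs j (by omega)]
    simp only [List.range'_succ, List.range'_zero, List.map_cons, List.map_nil,
      List.flatten_cons, List.flatten_nil, List.append_nil]
    cases PySem.Int.ofCharsBase? (B ++ hdrChunk st cs j) 2 <;> simp [Option.map]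
  | succ d ih =>
    intro j B fuel hj hfuel
    obtain ⟨f, hf⟩ : ∃ f, fuel = f + 1 := ⟨fuel - 1, by omega⟩
    subst hf
    have hjk : j < k := by omega
    have hjlt : j * st < cs.length := by
      calc j * st ≤ k * st := Nat.mul_le_mul_right st (by omega)
        _ < cs.length := hk
    simp only [hdrLoopA, hdr_batch_eq st cs j, hdr_get_batch st cs j (by omega) hjlt]
    rw [if_neg (hprev j hjk)]
    simp only [hdr_chunk_slice st cs j (by omega)]
    have hcast : (j : Int) + 1 = ((j + 1 : Nat) : Int) := by push_cast; ring
    rw [hcast, ih (j + 1) (B ++ hdrChunk st cs j) f (by omega) (by omega)]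
    conv_rhs => rw [List.range'_succ]
    simp [List.append_assoc]

-- ---- B side: the find-jump loop ----
theorem hdr_prefix_one (cs : List Char) (p : Nat) (h : p < cs.length)
    (hc : cs.getD p ' ' = '1') : ['1'] <+: cs.drop p := by
  have hget : cs[p] = '1' := by rwa [List.getD_eq_getElem cs ' ' h] at hc
  have hdrop : cs.drop p = '1' :: cs.drop (p + 1) := by
    rw [List.drop_eq_getElem_cons h, hget]
  rw [hdrop]
  exact ⟨cs.drop (p + 1), rfl⟩

theorem hdr_jump_eq (st : Nat) (cs : List Char) (k : Nat) (hst : 2 ≤ st)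
    (hk : k * st < cs.length)
    (hflag : cs.getD (k * st) ' ' = '1')
    (hprev : ∀ j < k, cs.getD (j * st) ' ' ≠ '1') :
    ∀ (fuel m : Nat), m ≤ k * st → k * st - m + 1 ≤ fuel →
      hdrJump (st : Int) cs (PySem.Chars.findFrom cs ['1'] (m : Int) none) fuel
        = ((k * st : Nat) : Int) := by
  intro fuel
  induction fuel with
  | zero => intro m _ hfuel; omega
  | succ f ih =>
    intro m hm hfuel
    have hmlen : m ≤ cs.length := by omega
    -- the flag character gives an occurrence of "1" in cs.drop m
    have hinf : ['1'] <:+: cs.drop m := by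
      have h1 : ['1'] <+: (cs.drop m).drop (k * st - m) := by
        rw [List.drop_drop, show m + (k * st - m) = k * st by omega]
        exact hdr_prefix_one cs (k * st) hk hflag
      exact h1.isInfix.trans (List.drop_suffix (k * st - m) (cs.drop m)).isInfix
    have hne : PySem.Chars.findFrom cs ['1'] (m : Int) none ≠ -1 := by
      rw [ne_eq, PySem.Chars.findFrom_natCast_eq_neg_one_iff cs ['1'] m hmlen]
      simp [hinf]
    obtain ⟨hmle, hpre, hfirst⟩ := PySem.Chars.findFrom_natCast_spec cs ['1'] m hmlen hne
    set r := PySem.Chars.findFrom cs ['1'] (m : Int) none with hr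
    have hr0 : 0 ≤ r := le_trans (by exact_mod_cast Nat.zero_le m) hmle
    have hrcast : r = ((r.toNat : Nat) : Int) := by omega
    have hrle : r.toNat ≤ k * st := by
      by_contra hgt
      exact hfirst (k * st) (by omega) (by omega) (hdr_prefix_one cs (k * st) hk hflag)
    have hrone : cs.getD r.toNat ' ' = '1' := by
      obtain ⟨t, ht⟩ := hpre
      have hlen : r.toNat < cs.length := by
        have := congrArg List.length ht
        simp [List.length_drop] at this
        omega
      rw [List.getD_eq_getElem cs ' ' hlen]
      rw [List.drop_eq_getElem_cons hlen] at ht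
      have ht2 : '1' :: t = cs[r.toNat] :: cs.drop (r.toNat + 1) := ht
      exact ((List.cons_eq_cons.mp ht2).1).symm
    rw [hdrJump, if_neg hne, hrcast, PySem.Int.mod_natCast]
    by_cases hmod : r.toNat % st = 0
    · rw [if_pos (by exact_mod_cast hmod)]
      -- r.toNat is a flag slot bearing '1'; minimality of k forces r.toNat = k * st
      obtain ⟨m', hm'⟩ := Nat.dvd_of_mod_eq_zero hmod
      have hm'k : m' ≤ k := by
        by_contra h
        have h3 : st * (k + 1) ≤ st * m' := Nat.mul_le_mul (Nat.le_refl st) (by omega)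
        rw [Nat.mul_succ, Nat.mul_comm st k] at h3
        omega
      have hq : m' = k := by
        by_contra h
        exact hprev m' (by omega) (by rw [← Nat.mul_comm st m', ← hm']; exact hrone)
      rw [show r.toNat = k * st by rw [hm', hq, Nat.mul_comm]]
    · rw [if_neg (by exact_mod_cast hmod)]
      have hrlt : r.toNat < k * st := by
        rcases Nat.lt_or_eq_of_le hrle with h | h
        · exact h
        · exact absurd (h ▸ Nat.mul_mod_left k st) hmod
      rw [show ((r.toNat : Nat) : Int) + 1 = ((r.toNat + 1 : Nat) : Int) by push_cast; ring]
      exact ih (r.toNat + 1) (by omega) (by omega)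

-- ---- B side: the enumerate-filter extraction ----
-- proof-only helper: what Source B's genexp keeps from list l starting at absolute index s
def hdrKeep (st : Nat) : List Char → Nat → List Char
  | [], _ => []
  | c :: t, s => if s % st ≠ 0 then c :: hdrKeep st t (s + 1) else hdrKeep st t (s + 1)

theorem hdr_filter_eq_keep (st : Nat) (l : List Char) :
    ∀ s : Nat,
      ((PySem.List.enumerate l ((s : Nat) : Int)).filter
          (fun p => !(PySem.Int.mod p.1 (st : Int) == 0))).map (·.2) = hdrKeep st l s := by
  induction l with
  | nil => intro s; simp [PySem.List.enumerate_nil, hdrKeep]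
  | cons c t ih =>
    intro s
    have hmod : PySem.Int.mod ((s : Nat) : Int) (st : Int) = ((s % st : Nat) : Int) :=
      PySem.Int.mod_natCast s st
    have hcast : ((s : Nat) : Int) + 1 = ((s + 1 : Nat) : Int) := by push_cast; ring
    rw [PySem.List.enumerate_cons, List.filter_cons]
    by_cases h : s % st = 0
    · have hb : (!(PySem.Int.mod ((s : Nat) : Int) ((st : Nat) : Int) == 0)) = false := by
        rw [hmod, h]; rfl
      rw [hb, if_neg (by simp), hcast, ih (s + 1), hdrKeep, if_neg (by omega)]
    · have hb : (!(PySem.Int.mod ((s : Nat) : Int) ((st : Nat) : Int) == 0)) = true := by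
        rw [hmod]
        simpa using (by exact_mod_cast h : ((s % st : Nat) : Int) ≠ 0)
      rw [hb, if_pos rfl, List.map_cons, hcast, ih (s + 1), hdrKeep, if_pos (by omega)]

theorem hdr_keep_append (st : Nat) (l1 l2 : List Char) :
    ∀ s : Nat, hdrKeep st (l1 ++ l2) s = hdrKeep st l1 s ++ hdrKeep st l2 (s + l1.length) := by
  induction l1 with
  | nil => intro s; simp [hdrKeep]
  | cons c t ih =>
    intro s
    simp only [List.cons_append, hdrKeep, List.length_cons]
    by_cases h : s % st ≠ 0
    · rw [if_pos h, if_pos h, ih (s + 1), List.cons_append,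
        show s + 1 + t.length = s + (t.length + 1) by omega]
    · rw [if_neg h, if_neg h, ih (s + 1),
        show s + 1 + t.length = s + (t.length + 1) by omega]

theorem hdr_keep_all (st : Nat) (l : List Char) :
    ∀ s : Nat, (∀ j, j < l.length → (s + j) % st ≠ 0) → hdrKeep st l s = l := by
  induction l with
  | nil => intro s _; rfl
  | cons c t ih =>
    intro s h
    have h0 : s % st ≠ 0 := by simpa using h 0 (by simp)
    rw [hdrKeep, if_pos h0, ih (s + 1) ?_]
    intro j hj
    have := h (j + 1) (by simp; omega)
    rw [show s + 1 + j = s + (j + 1) by omega]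
    exact this

theorem hdr_keep_block (st : Nat) (cs : List Char) (m : Nat) (hst : 2 ≤ st)
    (h : m * st < cs.length) :
    hdrKeep st ((cs.drop (m * st)).take st) (m * st) = hdrChunk st cs m := by
  rw [List.drop_eq_getElem_cons h]
  obtain ⟨st', rfl⟩ : ∃ st', st = st' + 1 := ⟨st - 1, by omega⟩
  rw [List.take_succ_cons, hdrKeep, if_neg (by simp [Nat.mul_mod_left])]
  have hall : ∀ j, j < ((cs.drop (m * (st' + 1) + 1)).take st').length →
      (m * (st' + 1) + 1 + j) % (st' + 1) ≠ 0 := by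
    intro j hj
    have hjlt : j < st' := lt_of_lt_of_le hj (List.length_take_le _ _)
    rw [show m * (st' + 1) + 1 + j = (1 + j) + m * (st' + 1) by ring,
      Nat.add_mul_mod_self_right, Nat.mod_eq_of_lt (by omega)]
    omega
  rw [hdr_keep_all (st' + 1) _ (m * (st' + 1) + 1) hall, hdrChunk]
  norm_num

theorem hdr_keep_prefix (st : Nat) (cs : List Char) (hst : 2 ≤ st) :
    ∀ k : Nat, k * st < cs.length →
      hdrKeep st (cs.take ((k + 1) * st)) 0 = hdrBits st cs k := by
  intro k
  induction k with
  | zero =>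
    intro hk
    have hb := hdr_keep_block st cs 0 hst (by simpa using hk)
    simp only [Nat.zero_mul, List.drop_zero] at hb
    rw [show (0 + 1) * st = st by ring, hb]
    simp [hdrBits]
  | succ k ih =>
    intro hk
    have hklt : k * st < cs.length := by nlinarith
    have hsplit : cs.take ((k + 2) * st)
        = cs.take ((k + 1) * st) ++ (cs.drop ((k + 1) * st)).take st := by
      rw [← List.take_add]
      congr 1
      ring
    have hlen : (cs.take ((k + 1) * st)).length = (k + 1) * st := by
      simp [List.length_take]
      omega
    rw [show (k + 1 + 1) * st = (k + 2) * st by ring, hsplit, hdr_keep_append, ih hklt, hlen]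
    rw [show (0 + (k + 1) * st) = (k + 1) * st by omega]
    rw [hdr_keep_block st cs (k + 1) hst hk]
    rw [hdrBits, hdrBits]
    simp [List.range_succ, List.append_assoc]

-- ===== VERDICT (by name: the statement is the Claim_ definition above) =====
theorem header_extractor_spec : Claim_equal_header_extractor := by
  intro step input_str _hdom hpre
  obtain ⟨hstep, k, hklen, hflag, hprev, hsome⟩ := hpre
  obtain ⟨st, rfl⟩ : ∃ st : Nat, step = (st : Int) := ⟨step.toNat, by omega⟩
  have hst : 2 ≤ st := by exact_mod_cast hstep
  rw [Int.toNat_natCast] at hflag hprev hsome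
  have hkst : k * st < input_str.toList.length := by
    by_contra h
    rw [List.getD_eq_default input_str.toList ' ' (by omega)] at hflag
    exact absurd hflag (by decide)
  obtain ⟨v, hv⟩ := Option.isSome_iff_exists.mp hsome
  show header_extractor (st : Int) input_str = header_extractor_alt (st : Int) input_str
  have hA : header_extractor (st : Int) input_str = (((k : Int) + 1) * (st : Int), v) := by
    unfold header_extractor
    have hL := hdr_loopA_eq st input_str.toList k hst hkst hflag hprev k 0 []
      (input_str.toList.length + 2) (by omega) (by nlinarith)
    simp only [Nat.cast_zero] at hL
    rw [hL]
    rw [show List.range' 0 (k + 1) = List.range (k + 1) from List.range_eq_range'.symm]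
    rw [show ((List.range (k + 1)).map (hdrChunk st input_str.toList)).flatten
        = hdrBits st input_str.toList k from rfl, List.nil_append, hv]
    rfl
  have hB : header_extractor_alt (st : Int) input_str = (((k : Int) + 1) * (st : Int), v) := by
    unfold header_extractor_alt
    have hfind : PySem.Chars.find input_str.toList ['1']
        = PySem.Chars.findFrom input_str.toList ['1'] (((0 : Nat) : Int)) none := by
      rw [Nat.cast_zero, PySem.Chars.findFrom_zero]
    rw [hfind, hdr_jump_eq st input_str.toList k hst hkst hflag hprev
      (input_str.toList.length + 2) 0 (by omega) (by omega)]
    unfold hdrFinish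
    rw [if_neg (by omega)]
    rw [show ((k * st : Nat) : Int) + (st : Int) = (((k + 1) * st : Nat) : Int) by push_cast; ring]
    rw [PySem.List.slice_to_natCast]
    have hf := hdr_filter_eq_keep st (input_str.toList.take ((k + 1) * st)) 0
    rw [Nat.cast_zero] at hf
    rw [hf, hdr_keep_prefix st input_str.toList hst k hkst, hv]
    show ((((k + 1) * st : Nat) : Int), v) = (((k : Int) + 1) * (st : Int), v)
    simp only [Prod.mk.injEq]
    exact ⟨by push_cast; ring, trivial⟩
  rw [hA, hB]
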